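-- pv_equiv track=rewrite | github.com/wmouwen/everybody-codes | events/2024/7/solution.py | device_essence
-- ===== SOURCE A (Python) =====
-- from enum import StrEnum
--
-- class Action(StrEnum):
--     INCREASE = '+'
--     DECREASE = '-'
--     MAINTAIN = '='
--     START = 'S'
--
-- def device_essence(device: list[Action], track: list[Action], loops: int) -> int:
--     output = 0
--     power = 10
--
--     for s in range(len(track) * (len(device) if loops % len(device) == 0 else loops)):
--         match track[(s + 1) % len(track)]:
--             case Action.INCREASE:
--                 power += 1
--             case Action.DECREASE:
--                 power -= 1
--             case _:
--                 match device[s % len(device)]: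
--                     case Action.INCREASE:
--                         power += 1
--                     case Action.DECREASE:
--                         power -= 1
--
--         output += power
--
--     return output
-- ===== SOURCE B (Python) =====
-- def device_essence(device, track, loops):
--     T = len(track)
--     D = len(device)
--     steps = T * (D if loops % D == 0 else loops)
--     if steps <= 0:
--         return 0
--     # period of the per-step delta: lcm(T, D)
--     g, b = T, D
--     while b:
--         g, b = b, g % b
--     L = T * D // g
--     q, r = divmod(steps, L)
--     # one pass over a single period: C0 = output of a full block starting at
--     # power 10, Cr = output of the first r steps, S = net power change per block
--     acc = 0
--     C0 = 0
--     Cr = 0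
--     for s in range(L):
--         c = track[(s + 1) % T]
--         if c == '+':
--             acc += 1
--         elif c == '-':
--             acc -= 1
--         else:
--             e = device[s % D]
--             if e == '+':
--                 acc += 1
--             elif e == '-':
--                 acc -= 1
--         C0 += 10 + acc
--         if s + 1 == r:
--             Cr = C0
--     S = acc
--     return q * C0 + L * S * (q * (q - 1) // 2) + Cr + r * q * S
-- ===== Notes on version B (the rewrite author's own statement) =====
-- stated objective: faster
-- what changed: B replaces A's step-by-step simulation of every step with closed-form arithmetic: the per-step power change is periodic with period lcm(len(track), len(device)), so B scans one period once and combines the per-block sums with an arithmetic-series formula for the full blocks plus the remainder prefix.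
import Mathlib
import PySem

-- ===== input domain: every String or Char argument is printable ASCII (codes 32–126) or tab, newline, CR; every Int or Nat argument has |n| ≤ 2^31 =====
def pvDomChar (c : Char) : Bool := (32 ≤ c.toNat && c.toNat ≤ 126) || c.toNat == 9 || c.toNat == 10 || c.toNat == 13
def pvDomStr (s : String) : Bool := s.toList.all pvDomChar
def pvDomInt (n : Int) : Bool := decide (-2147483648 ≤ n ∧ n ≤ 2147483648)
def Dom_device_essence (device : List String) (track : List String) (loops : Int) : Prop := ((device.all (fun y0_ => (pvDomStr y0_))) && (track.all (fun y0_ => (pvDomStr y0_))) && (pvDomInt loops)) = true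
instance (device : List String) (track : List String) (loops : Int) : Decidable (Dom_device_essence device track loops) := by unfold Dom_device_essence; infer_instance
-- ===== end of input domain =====

-- B replaces A's O(len(track)*loops) step-by-step simulation by closed-form arithmetic over
-- one period of length lcm(len(track), len(device)) (objective: faster, asymptotic).


-- ===== PORT A =====
def device_essence (device : List String) (track : List String) (loops : Int) : Int :=
  let T : Int := (track.length : Int)
  let D : Int := (device.length : Int)
  let res := (PySem.List.pyRange 0 (T * (if PySem.Int.mod loops D = 0 then D else loops)) 1).foldl
    (fun (st : Int × Int) (s : Int) =>
      -- indices (s+1) % T and s % D are always in range when the loop runs, so getD's default is never used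
      let t := PySem.List.pyGetD track (PySem.Int.mod (s + 1) T) ""
      let power : Int :=
        if t = "+" then st.2 + 1
        else if t = "-" then st.2 - 1
        else
          let d := PySem.List.pyGetD device (PySem.Int.mod s D) ""
          if d = "+" then st.2 + 1
          else if d = "-" then st.2 - 1
          else st.2
      (st.1 + power, power)) (0, 10)
  res.1

-- ===== PORT B =====
-- Source B's hand-written Euclid loop
def pvGcd (g b : Nat) : Nat :=
  if h : b = 0 then g else pvGcd b (g % b)
termination_by b
decreasing_by exact Nat.mod_lt _ (Nat.pos_of_ne_zero h)

def device_essence_alt (device : List String) (track : List String) (loops : Int) : Int :=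
  let T := track.length
  let D := device.length
  let steps : Int := (T : Int) * (if PySem.Int.mod loops (D : Int) = 0 then (D : Int) else loops)
  if steps ≤ 0 then 0
  else
    -- all quantities below are nonnegative Python ints, ported as Nat
    let L : Nat := T * D / pvGcd T D
    let n : Nat := steps.toNat
    let q : Nat := n / L
    let r : Nat := n % L
    let st := (List.range L).foldl
      (fun (st : Int × Int × Int) (s : Nat) =>
        let t := track.getD ((s + 1) % T) ""
        let acc : Int :=
          if t = "+" then st.1 + 1
          else if t = "-" then st.1 - 1
          else
            let e := device.getD (s % D) ""
            if e = "+" then st.1 + 1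
            else if e = "-" then st.1 - 1
            else st.1
        let c0 := st.2.1 + (10 + acc)
        let cr := if s + 1 = r then c0 else st.2.2
        (acc, c0, cr)) (0, 0, 0)
    let S := st.1
    (q : Int) * st.2.1 + (L : Int) * S * ((q * (q - 1) / 2 : Nat) : Int) + st.2.2 + (r : Int) * (q : Int) * S

-- ===== PRECONDITION & SPEC =====
-- Pre_ excludes only device = [], where Python A raises ZeroDivisionError (loops % len(device)).
def Pre_device_essence (device : List String) (track : List String) (loops : Int) : Prop := device ≠ []
instance (device : List String) (track : List String) (loops : Int) : Decidable (Pre_device_essence device track loops) := by unfold Pre_device_essence; infer_instance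

def pvWitness_device_essence : List String × List String × Int := (["+", "-"], ["=", "+", "S"], 5)

def Spec_device_essence (device : List String) (track : List String) (loops : Int) (out : Int) : Prop := out = device_essence_alt device track loops
instance (device : List String) (track : List String) (loops : Int) (out : Int) : Decidable (Spec_device_essence device track loops out) := by unfold Spec_device_essence; infer_instance

-- ===== CLAIM (what is proved, stated in full; the proofs are below) =====
def Claim_equal_device_essence : Prop := ∀ (device : List String) (track : List String) (loops : Int), Dom_device_essence device track loops → Pre_device_essence device track loops → Spec_device_essence device track loops (device_essence device track loops)

-- ===== LEMMAS AND PROOFS =====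

-- the per-step power change; step s reads track[(s+1) % T] and device[s % D]
def pvDelta (device track : List String) (s : Nat) : Int :=
  let t := track.getD ((s + 1) % track.length) ""
  if t = "+" then 1
  else if t = "-" then -1
  else
    let e := device.getD (s % device.length) ""
    if e = "+" then 1 else if e = "-" then -1 else 0

-- run n steps of the simulation starting at step index a from state (output, power)
def pvRun (device track : List String) (a n : Nat) (st : Int × Int) : Int × Int :=
  (List.range n).foldl
    (fun st i =>
      let p := st.2 + pvDelta device track (a + i)
      (st.1 + p, p)) st

lemma pvRun_zero (dv tk : List String) (a : Nat) (st : Int × Int) :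
    pvRun dv tk a 0 st = st := by simp [pvRun]

lemma pvRun_succ (dv tk : List String) (a n : Nat) (st : Int × Int) :
    pvRun dv tk a (n + 1) st =
      ((pvRun dv tk a n st).1 + ((pvRun dv tk a n st).2 + pvDelta dv tk (a + n)),
        (pvRun dv tk a n st).2 + pvDelta dv tk (a + n)) := by
  simp [pvRun, List.range_succ]

lemma pvRun_affine (dv tk : List String) (a n : Nat) (o p : Int) :
    pvRun dv tk a n (o, p) =
      (o + (n : Int) * p + (pvRun dv tk a n (0, 0)).1, p + (pvRun dv tk a n (0, 0)).2) := by
  induction n with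
  | zero => simp [pvRun_zero]
  | succ n ih =>
      rw [pvRun_succ, pvRun_succ, ih]
      simp only [Prod.mk.injEq]
      push_cast
      constructor <;> ring

lemma pvRun_split (dv tk : List String) (a m n : Nat) (st : Int × Int) :
    pvRun dv tk a (m + n) st = pvRun dv tk (a + m) n (pvRun dv tk a m st) := by
  simp only [pvRun, List.range_add, List.foldl_append, List.foldl_map, Nat.add_assoc]

lemma pvRun_shift (dv tk : List String) (L : Nat)
    (h : ∀ s, pvDelta dv tk (s + L) = pvDelta dv tk s)
    (a n : Nat) (st : Int × Int) :
    pvRun dv tk (a + L) n st = pvRun dv tk a n st := by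
  induction n with
  | zero => simp [pvRun_zero]
  | succ n ih =>
      rw [pvRun_succ, pvRun_succ, ih]
      have : a + L + n = (a + n) + L := by omega
      rw [this, h]

lemma pvRun_shiftq (dv tk : List String) (L : Nat)
    (h : ∀ s, pvDelta dv tk (s + L) = pvDelta dv tk s)
    (q n : Nat) (st : Int × Int) :
    pvRun dv tk (q * L) n st = pvRun dv tk 0 n st := by
  induction q with
  | zero => simp
  | succ q ih =>
      have : (q + 1) * L = q * L + L := by ring
      rw [this, pvRun_shift dv tk L h, ih]

-- triangular numbers 0 + 1 + … + (q-1)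
def pvTri : Nat → Int
  | 0 => 0
  | q + 1 => pvTri q + q

lemma pvTri_eq (q : Nat) : pvTri q = ((q * (q - 1) / 2 : Nat) : Int) := by
  induction q with
  | zero => simp [pvTri]
  | succ q ih =>
      have hstep : (q + 1) * q / 2 = q * (q - 1) / 2 + q := by
        cases q with
        | zero => simp
        | succ s =>
            have h : (s + 2) * (s + 1) = (s + 1) * s + (s + 1) * 2 := by ring
            rw [Nat.succ_sub_one, h, Nat.add_mul_div_right _ _ (by norm_num : 0 < 2)]
      rw [pvTri]
      have : (q + 1) * ((q + 1) - 1) = (q + 1) * q := by simp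
      rw [this, hstep, ih]
      push_cast
      ring

lemma pvRun_blocks (dv tk : List String) (L : Nat)
    (h : ∀ s, pvDelta dv tk (s + L) = pvDelta dv tk s) (q : Nat) :
    pvRun dv tk 0 (q * L) (0, 10) =
      ((q : Int) * (pvRun dv tk 0 L (0, 10)).1 + (L : Int) * (pvRun dv tk 0 L (0, 0)).2 * pvTri q,
        10 + (q : Int) * (pvRun dv tk 0 L (0, 0)).2) := by
  induction q with
  | zero => simp [pvRun_zero, pvTri]
  | succ q ih =>
      have hmul : (q + 1) * L = q * L + L := by ring
      rw [hmul, pvRun_split, ih, Nat.zero_add, pvRun_shiftq dv tk L h, pvRun_affine,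
        pvTri]
      have hC : (pvRun dv tk 0 L (0, 10)).1 = (L : Int) * 10 + (pvRun dv tk 0 L (0, 0)).1 := by
        rw [pvRun_affine]; push_cast; ring
      simp only [Prod.mk.injEq]
      constructor
      · rw [hC]; push_cast; ring
      · push_cast; ring

lemma pvRun_main (dv tk : List String) (L : Nat)
    (h : ∀ s, pvDelta dv tk (s + L) = pvDelta dv tk s) (q r : Nat) :
    (pvRun dv tk 0 (q * L + r) (0, 10)).1 =
      (q : Int) * (pvRun dv tk 0 L (0, 10)).1 + (L : Int) * (pvRun dv tk 0 L (0, 0)).2 * pvTri q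
        + (pvRun dv tk 0 r (0, 10)).1 + (r : Int) * (q : Int) * (pvRun dv tk 0 L (0, 0)).2 := by
  rw [pvRun_split, Nat.zero_add, pvRun_shiftq dv tk L h, pvRun_blocks dv tk L h, pvRun_affine]
  have hC : (pvRun dv tk 0 r (0, 10)).1 = (r : Int) * 10 + (pvRun dv tk 0 r (0, 0)).1 := by
    rw [pvRun_affine]; push_cast; ring
  rw [hC]
  push_cast
  ring

-- the branch chain both loop bodies use equals "add pvDelta"
lemma pvDelta_branch (dv tk : List String) (s : Nat) (x : Int) :
    (if tk.getD ((s + 1) % tk.length) "" = "+" then x + 1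
      else if tk.getD ((s + 1) % tk.length) "" = "-" then x - 1
      else
        if dv.getD (s % dv.length) "" = "+" then x + 1
        else if dv.getD (s % dv.length) "" = "-" then x - 1
        else x) = x + pvDelta dv tk s := by
  simp only [pvDelta]
  split_ifs <;> ring

-- periodicity of the step with period lcm(T, D)
lemma pvDelta_period (dv tk : List String) (s : Nat) :
    pvDelta dv tk (s + Nat.lcm tk.length dv.length) = pvDelta dv tk s := by
  obtain ⟨k, hk⟩ := Nat.dvd_lcm_left tk.length dv.length
  obtain ⟨j, hj⟩ := Nat.dvd_lcm_right tk.length dv.length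
  simp only [pvDelta]
  have h1 : (s + Nat.lcm tk.length dv.length + 1) % tk.length = (s + 1) % tk.length := by
    rw [hk]
    have : s + tk.length * k + 1 = s + 1 + tk.length * k := by ring
    rw [this, Nat.add_mul_mod_self_left]
  have h2 : (s + Nat.lcm tk.length dv.length) % dv.length = s % dv.length := by
    rw [hj, Nat.add_mul_mod_self_left]
  rw [h1, h2]

lemma pvGcd_eq (g b : Nat) : pvGcd g b = Nat.gcd b g := by
  induction b using Nat.strong_induction_on generalizing g with
  | _ b ih =>
      rw [pvGcd]
      split
      · next h => subst h; simp
      · next h =>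
          rw [ih (g % b) (Nat.mod_lt _ (Nat.pos_of_ne_zero h)) b]
          exact (Nat.gcd_rec b g).symm

-- B's one-period loop: invariant giving acc, C0 and Cr after m iterations
lemma pvAltLoop (dv tk : List String) (r : Nat) (m : Nat) :
    (List.range m).foldl
      (fun (st : Int × Int × Int) (s : Nat) =>
        let t := tk.getD ((s + 1) % tk.length) ""
        let acc : Int :=
          if t = "+" then st.1 + 1
          else if t = "-" then st.1 - 1
          else
            let e := dv.getD (s % dv.length) ""
            if e = "+" then st.1 + 1
            else if e = "-" then st.1 - 1
            else st.1
        let c0 := st.2.1 + (10 + acc)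
        let cr := if s + 1 = r then c0 else st.2.2
        (acc, c0, cr)) (0, 0, 0) =
      ((pvRun dv tk 0 m (0, 0)).2, (pvRun dv tk 0 m (0, 10)).1,
        if r = 0 ∨ m < r then 0 else (pvRun dv tk 0 r (0, 10)).1) := by
  induction m with
  | zero => simp [pvRun_zero]
  | succ m ih =>
      rw [List.range_succ, List.foldl_append, ih]
      simp only [List.foldl_cons, List.foldl_nil]
      have hp : (pvRun dv tk 0 m (0, 10)).2 = 10 + (pvRun dv tk 0 m (0, 0)).2 := by
        rw [pvRun_affine]
      have hacc : (pvRun dv tk 0 (m + 1) (0, 0)).2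
          = (pvRun dv tk 0 m (0, 0)).2 + pvDelta dv tk m := by
        rw [pvRun_succ]; simp
      have hout : (pvRun dv tk 0 (m + 1) (0, 10)).1
          = (pvRun dv tk 0 m (0, 10)).1 + (10 + ((pvRun dv tk 0 m (0, 0)).2 + pvDelta dv tk m)) := by
        rw [pvRun_succ]
        simp only [Nat.zero_add]
        rw [hp]; ring
      rw [pvDelta_branch dv tk m]
      simp only [Prod.mk.injEq]
      refine ⟨hacc.symm, hout.symm, ?_⟩
      by_cases hmr : m + 1 = r
      · subst hmr
        rw [if_pos rfl, if_neg (by omega)]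
        exact hout.symm
      · rw [if_neg hmr]
        by_cases h0 : r = 0 ∨ m < r
        · rw [if_pos h0, if_pos (by omega)]
        · rw [if_neg h0, if_neg (by omega)]

-- A's fold over pyRange 0 n 1 is pvRun 0 n (0,10)
lemma pvAFold (dv tk : List String) (n : Nat) :
    ((PySem.List.pyRange 0 (n : Int) 1).foldl
      (fun (st : Int × Int) (s : Int) =>
        let t := PySem.List.pyGetD tk (PySem.Int.mod (s + 1) (tk.length : Int)) ""
        let power : Int :=
          if t = "+" then st.2 + 1
          else if t = "-" then st.2 - 1
          else
            let d := PySem.List.pyGetD dv (PySem.Int.mod s (dv.length : Int)) ""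
            if d = "+" then st.2 + 1
            else if d = "-" then st.2 - 1
            else st.2
        (st.1 + power, power)) (0, 10)) = pvRun dv tk 0 n (0, 10) := by
  rw [PySem.List.pyRange_zero_natCast, List.foldl_map, pvRun]
  apply PySem.List.foldl_congr_mem
  intro acc s _
  have h1 : ((s : Int) + 1) = ((s + 1 : Nat) : Int) := by push_cast; ring
  rw [h1, PySem.Int.mod_natCast, PySem.Int.mod_natCast,
    PySem.List.pyGetD_natCast, PySem.List.pyGetD_natCast]
  simp only [Nat.zero_add]
  rw [← pvDelta_branch dv tk s acc.2]

lemma pyRange_nonpos (e : Int) (h : e ≤ 0) : PySem.List.pyRange 0 e 1 = [] := by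
  simp [PySem.List.pyRange]
  all_goals omega

-- ===== VERDICT (by name: the statement is the Claim_ definition above) =====
theorem device_essence_spec : Claim_equal_device_essence := by
  intro dv tk loops _ hpre
  unfold Spec_device_essence device_essence device_essence_alt
  simp only []
  set T := tk.length with hT
  set D := dv.length with hD
  set E : Int := (T : Int) * (if PySem.Int.mod loops (D : Int) = 0 then (D : Int) else loops) with hE
  by_cases hle : E ≤ 0
  · rw [if_pos hle, pyRange_nonpos E hle]
    rfl
  · rw [if_neg hle]
    push_neg at hle
    have hD0 : 0 < D := by
      rw [hD]; cases dv with
      | nil => exact absurd rfl hpre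
      | cons a l => simp
    have hT0 : 0 < T := by
      by_contra h
      have : T = 0 := by omega
      rw [this] at hE
      simp at hE
      omega
    -- L computed by port B is the lcm
    have hLgcd : T * D / pvGcd T D = Nat.lcm T D := by
      rw [pvGcd_eq, Nat.gcd_comm]; rfl
    set L := Nat.lcm T D with hL
    have hL0 : 0 < L := Nat.pos_of_ne_zero (Nat.lcm_ne_zero (by omega) (by omega))
    set n := E.toNat with hn
    have hnE : (n : Int) = E := Int.toNat_of_nonneg (by omega)
    have hper : ∀ s, pvDelta dv tk (s + L) = pvDelta dv tk s := fun s => pvDelta_period dv tk s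
    rw [← hnE, pvAFold, hLgcd]
    have hrlt : n % L < L := Nat.mod_lt _ hL0
    rw [show pvRun dv tk 0 n (0, 10) = pvRun dv tk 0 (n / L * L + n % L) (0, 10) from by
      rw [Nat.div_add_mod' n L]]
    rw [pvRun_main dv tk L hper (n / L) (n % L), pvAltLoop dv tk (n % L) L]
    have hcr : (if n % L = 0 ∨ L < n % L then 0 else (pvRun dv tk 0 (n % L) (0, 10)).1)
        = (pvRun dv tk 0 (n % L) (0, 10)).1 := by
      by_cases h0 : n % L = 0
      · rw [if_pos (Or.inl h0), h0, pvRun_zero]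
      · rw [if_neg (by push_neg; exact ⟨h0, Nat.le_of_lt hrlt⟩)]
    rw [hcr, ← pvTri_eq]
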